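-- pv_equiv track=rewrite | github.com/gnoohtwh/codeforcessolution | Python/263a.py | BeautiMat
-- ===== SOURCE A (Python) =====
-- def FindIndex(matrix):
--     for i in range(len(matrix)):
--         for j in range(len(matrix)):
--             if matrix[i][j] == 1:
--                 return [i,j]
--     pass
--
-- def BeautiMat(matrix): #Checking if the location has the nearest index to the third column or row
--     oneNumLocation = FindIndex(matrix)
--     i = oneNumLocation[0]
--     j = oneNumLocation[1]
--     count = 0
-- # i = 1, j = 4
--     while True:
--         if abs(i - 2) >= abs(j - 2) and i != 2 :
--             if i < 2:
--                 i += 1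
--                 count += 1
--             elif i > 2:
--                 i -= 1
--                 count += 1
--         elif abs(i - 2) < abs(j - 2) and j != 2 :
--             if j < 2:
--                 j += 1
--                 count += 1
--             elif j> 2:
--                 j -= 1
--                 count += 1
--
--
--
--         if i == 2 and j == 2:
--             return count
--             break
-- ===== SOURCE B (Python) =====
-- def BeautiMat(matrix):
--     # same first-match scan as A's FindIndex, but the walk is replaced
--     # by the closed-form Manhattan distance to the center (2,2)
--     n = len(matrix)
--     for i in range(n):
--         row = matrix[i]
--         for j in range(n):
--             if row[j] == 1:
--                 return abs(i - 2) + abs(j - 2)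
-- ===== Notes on version B (the rewrite author's own statement) =====
-- stated objective: simpler
-- what changed: B keeps A's first-match scan for the 1 but replaces A's step-by-step while-loop walk to the center with the closed form abs(i-2)+abs(j-2).
import Mathlib
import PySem

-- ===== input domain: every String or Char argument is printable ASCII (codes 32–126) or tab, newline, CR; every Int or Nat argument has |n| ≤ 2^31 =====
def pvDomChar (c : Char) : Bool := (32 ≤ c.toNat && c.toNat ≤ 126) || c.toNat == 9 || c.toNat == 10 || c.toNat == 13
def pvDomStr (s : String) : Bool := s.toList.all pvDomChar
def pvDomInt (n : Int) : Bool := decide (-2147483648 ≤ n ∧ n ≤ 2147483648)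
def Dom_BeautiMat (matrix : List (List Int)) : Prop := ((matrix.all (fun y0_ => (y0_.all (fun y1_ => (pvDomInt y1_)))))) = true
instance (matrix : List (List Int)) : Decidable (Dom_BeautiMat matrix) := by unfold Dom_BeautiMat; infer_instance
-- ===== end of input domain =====

-- B replaces A's step-by-step while-loop walk with the closed form |i-2|+|j-2|; the
-- equivalence is about the RETURN value on inputs where A returns (Pre_ below).

-- ===== PORT A =====
-- inner 'for j in range(n)' of FindIndex; out-of-range access is Python's IndexError,
-- excluded by Pre_ (the port treats it as no match there)
def pvFindRowA (matrix : List (List Int)) (i : Int) : List Int → Option (Int × Int)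
  | [] => none
  | j :: js =>
    if PySem.List.pyGet? ((PySem.List.pyGet? matrix i).getD []) j = some 1 then some (i, j)
    else pvFindRowA matrix i js

-- outer 'for i in range(len(matrix))' of FindIndex; none = Python's 'pass' (returns None)
def pvFindIndexA (matrix : List (List Int)) (n : Nat) : List Int → Option (Int × Int)
  | [] => none
  | i :: is =>
    match pvFindRowA matrix i (PySem.List.pyRange 0 (n : Int) 1) with
    | some p => some p
    | none => pvFindIndexA matrix n is

-- the 'while True' walk of A; each firing branch moves one step toward (2,2).
-- 'fuel' is only a totality guard: the caller passes |i-2|+|j-2|+1, strictly more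
-- than the number of iterations the Python loop performs, so fuel never runs out.
def pvLoopA : Nat → Int → Int → Int → Int
  | 0, _, _, count => count  -- unreachable with sufficient fuel
  | fuel + 1, i, j, count =>
    if |i - 2| ≥ |j - 2| ∧ i ≠ 2 then
      if i < 2 then
        (if i + 1 = 2 ∧ j = 2 then count + 1 else pvLoopA fuel (i + 1) j (count + 1))
      else  -- i ≠ 2 and ¬ i < 2, so Python's 'elif i > 2' branch fires
        (if i - 1 = 2 ∧ j = 2 then count + 1 else pvLoopA fuel (i - 1) j (count + 1))
    else if |i - 2| < |j - 2| ∧ j ≠ 2 then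
      if j < 2 then
        (if i = 2 ∧ j + 1 = 2 then count + 1 else pvLoopA fuel i (j + 1) (count + 1))
      else  -- j ≠ 2 and ¬ j < 2, so Python's 'elif j > 2' branch fires
        (if i = 2 ∧ j - 1 = 2 then count + 1 else pvLoopA fuel i (j - 1) (count + 1))
    else
      count  -- neither branch fired: necessarily i = 2 ∧ j = 2, Python returns count

def BeautiMat (matrix : List (List Int)) : Int :=
  match pvFindIndexA matrix matrix.length (PySem.List.pyRange 0 (matrix.length : Int) 1) with
  | none => 0  -- Python: FindIndex returned None, 'None[0]' raises TypeError; outside Pre_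
  | some (i, j) => pvLoopA ((i - 2).natAbs + (j - 2).natAbs + 1) i j 0

-- ===== PORT B =====
-- inner 'for j in range(n)': first 1 in this row yields the closed-form answer
def pvScanRowB (row : List Int) (i : Int) : List Int → Option Int
  | [] => none
  | j :: js =>
    if PySem.List.pyGet? row j = some 1 then some (|i - 2| + |j - 2|)
    else pvScanRowB row i js

-- outer 'for i in range(n)' of B
def pvScanB (matrix : List (List Int)) (n : Nat) : List Int → Option Int
  | [] => none
  | i :: is =>
    match pvScanRowB ((PySem.List.pyGet? matrix i).getD []) i (PySem.List.pyRange 0 (n : Int) 1) with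
    | some r => some r
    | none => pvScanB matrix n is

def BeautiMat_alt (matrix : List (List Int)) : Int :=
  (pvScanB matrix matrix.length (PySem.List.pyRange 0 (matrix.length : Int) 1)).getD 0
  -- none = Python's B falls off the loop and returns None (no Int); outside Pre_

-- ===== PRECONDITION & SPEC =====
-- Pre_ admits exactly the inputs on which A returns: the row-major scan (within the
-- square n×n window, n = len(matrix)) reaches a 1 without an IndexError — some row i
-- has a 1 among its first n entries, every earlier row has ≥ n entries and no 1 there.
def Pre_BeautiMat (matrix : List (List Int)) : Prop :=
  ∃ i < matrix.length,
    (1 : Int) ∈ (matrix.getD i []).take matrix.length ∧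
    ∀ k < i, matrix.length ≤ (matrix.getD k []).length ∧
      (1 : Int) ∉ (matrix.getD k []).take matrix.length
instance (matrix : List (List Int)) : Decidable (Pre_BeautiMat matrix) := by
  unfold Pre_BeautiMat; infer_instance
def pvWitness_BeautiMat : List (List Int) := [[0, 1], [0, 0]]
def Spec_BeautiMat (matrix : List (List Int)) (out : Int) : Prop := out = BeautiMat_alt matrix
instance (matrix : List (List Int)) (out : Int) : Decidable (Spec_BeautiMat matrix out) := by
  unfold Spec_BeautiMat; infer_instance

-- ===== CLAIM (what is proved, stated in full; the proofs are below) =====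
def Claim_equal_BeautiMat : Prop := ∀ (matrix : List (List Int)), Dom_BeautiMat matrix → Pre_BeautiMat matrix → Spec_BeautiMat matrix (BeautiMat matrix)

-- ===== LEMMAS AND PROOFS =====

-- A's walk counts exactly the Manhattan distance from (i,j) to (2,2)
theorem pvLoopA_eq (fuel : Nat) : ∀ (i j count : Int),
    (i - 2).natAbs + (j - 2).natAbs < fuel →
    pvLoopA fuel i j count = count + |i - 2| + |j - 2| := by
  induction fuel with
  | zero => intro i j count h; omega
  | succ n ih =>
    intro i j count h
    simp only [pvLoopA]
    split_ifs with h1 h2 h3 h4 h5 h6 h7 <;>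
      (try rw [ih]) <;> simp only [Int.abs_eq_natAbs] at * <;> omega

-- B's inner scan is A's inner scan post-composed with the distance
theorem pvScanRowB_eq (matrix : List (List Int)) (i : Int) (js : List Int) :
    pvScanRowB ((PySem.List.pyGet? matrix i).getD []) i js
      = (pvFindRowA matrix i js).map (fun p => |p.1 - 2| + |p.2 - 2|) := by
  induction js with
  | nil => rfl
  | cons j js ih =>
    simp only [pvScanRowB, pvFindRowA]
    split_ifs with h
    · rfl
    · exact ih

-- B's outer scan is A's outer scan post-composed with the distance
theorem pvScanB_eq (matrix : List (List Int)) (n : Nat) (is : List Int) :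
    pvScanB matrix n is
      = (pvFindIndexA matrix n is).map (fun p => |p.1 - 2| + |p.2 - 2|) := by
  induction is with
  | nil => rfl
  | cons i is ih =>
    simp only [pvScanB, pvFindIndexA, pvScanRowB_eq]
    cases pvFindRowA matrix i (PySem.List.pyRange 0 (n : Int) 1) with
    | none => simpa using ih
    | some p => rfl

-- ===== VERDICT (by name: the statement is the Claim_ definition above) =====
theorem BeautiMat_spec : Claim_equal_BeautiMat := by
  intro matrix _ _
  unfold Spec_BeautiMat BeautiMat BeautiMat_alt
  rw [pvScanB_eq]
  cases pvFindIndexA matrix matrix.length (PySem.List.pyRange 0 (matrix.length : Int) 1) with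
  | none => rfl
  | some p =>
    obtain ⟨i, j⟩ := p
    simp only [Option.map_some, Option.getD_some]
    rw [pvLoopA_eq _ _ _ _ (by omega)]
    ring
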